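-- pv_equiv track=rewrite | github.com/shankar-borate/policygpt-poc | improve_policies.py | infer_owner
-- ===== SOURCE A (Python) =====
-- def infer_owner(fn: str) -> str:
--     f = fn.lower()
--     if 'ciso'       in f: return 'CISO'
--     if any(x in f for x in ['recruitment', 'onboarding', 'background',
--                               'workapps-tech-recruit']): return 'HR Manager'
--     if any(x in f for x in ['asset', 'inventory', 'license']): return 'IT Asset Manager / CISO'
--     if any(x in f for x in ['cloud', 'aws', 'server', 'infra',
--                               'rto', 'trrp', 'contingency']): return 'CTO / DevOps Lead'
--     if any(x in f for x in ['coding', 'sdl', 'system-acquisition',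
--                               'garbage']): return 'Engineering Lead'
--     if any(x in f for x in ['quality']): return 'QA Manager'
--     if any(x in f for x in ['marketing', 'selling', 'anti-trust',
--                               'modern-slavery', 'ethical',
--                               'sar', 'customer-data',
--                               'outsourc']): return 'Legal / Compliance Officer'
--     if any(x in f for x in ['siem', 'log', 'monitoring',
--                               'ir-playbook']): return 'Security Operations Manager'
--     return 'CISO / CTO'
-- ===== SOURCE B (Python) =====
-- # Multi-pattern scan: one flat keyword->(priority, owner) index; walk the
-- # lowercased filename's positions, hash-look-up candidate substrings by
-- # length, and keep the minimum-priority hit (default if none).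
-- KW = {
--     'ciso': (0, 'CISO'),
--     'recruitment': (1, 'HR Manager'), 'onboarding': (1, 'HR Manager'),
--     'background': (1, 'HR Manager'), 'workapps-tech-recruit': (1, 'HR Manager'),
--     'asset': (2, 'IT Asset Manager / CISO'), 'inventory': (2, 'IT Asset Manager / CISO'),
--     'license': (2, 'IT Asset Manager / CISO'),
--     'cloud': (3, 'CTO / DevOps Lead'), 'aws': (3, 'CTO / DevOps Lead'),
--     'server': (3, 'CTO / DevOps Lead'), 'infra': (3, 'CTO / DevOps Lead'),
--     'rto': (3, 'CTO / DevOps Lead'), 'trrp': (3, 'CTO / DevOps Lead'),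
--     'contingency': (3, 'CTO / DevOps Lead'),
--     'coding': (4, 'Engineering Lead'), 'sdl': (4, 'Engineering Lead'),
--     'system-acquisition': (4, 'Engineering Lead'), 'garbage': (4, 'Engineering Lead'),
--     'quality': (5, 'QA Manager'),
--     'marketing': (6, 'Legal / Compliance Officer'), 'selling': (6, 'Legal / Compliance Officer'),
--     'anti-trust': (6, 'Legal / Compliance Officer'), 'modern-slavery': (6, 'Legal / Compliance Officer'),
--     'ethical': (6, 'Legal / Compliance Officer'), 'sar': (6, 'Legal / Compliance Officer'),
--     'customer-data': (6, 'Legal / Compliance Officer'), 'outsourc': (6, 'Legal / Compliance Officer'),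
--     'siem': (7, 'Security Operations Manager'), 'log': (7, 'Security Operations Manager'),
--     'monitoring': (7, 'Security Operations Manager'), 'ir-playbook': (7, 'Security Operations Manager'),
-- }
-- LENS = sorted({len(k) for k in KW})
--
-- def infer_owner(fn: str) -> str:
--     f = fn.lower()
--     best = None
--     for i in range(len(f)):
--         for L in LENS:
--             hit = KW.get(f[i:i+L])
--             if hit is not None and (best is None or hit[0] < best[0]):
--                 best = hit
--     return best[1] if best is not None else 'CISO / CTO'
-- ===== Notes on version B (the rewrite author's own statement) =====
-- stated objective: alternative
-- what changed: Instead of scanning rule-by-rule over the text, B builds one flat keyword->(priority, owner) hash index and scans the lowercased filename position by position, looking up candidate substrings by keyword length and keeping the minimum-priority hit (default if none).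
import Mathlib
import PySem

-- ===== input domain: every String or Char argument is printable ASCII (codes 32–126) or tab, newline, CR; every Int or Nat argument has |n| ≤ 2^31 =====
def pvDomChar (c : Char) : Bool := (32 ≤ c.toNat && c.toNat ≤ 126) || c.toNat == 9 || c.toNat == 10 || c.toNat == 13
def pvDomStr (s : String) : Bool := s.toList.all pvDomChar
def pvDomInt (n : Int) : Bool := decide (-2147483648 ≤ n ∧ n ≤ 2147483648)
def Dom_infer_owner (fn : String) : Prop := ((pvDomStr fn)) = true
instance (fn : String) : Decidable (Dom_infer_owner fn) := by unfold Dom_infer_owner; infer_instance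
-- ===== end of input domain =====

-- B replaces A's rule-by-rule substring scan by a single position-by-position scan of the
-- filename with a flat keyword->(priority, owner) hash index, keeping the minimum-priority hit.


-- ===== PORT A =====
def infer_owner (fn : String) : String :=
  let f := PySem.Str.lower fn
  if PySem.Str.isIn "ciso" f then "CISO"
  else if ["recruitment", "onboarding", "background", "workapps-tech-recruit"].any
      (fun x => PySem.Str.isIn x f) then "HR Manager"
  else if ["asset", "inventory", "license"].any (fun x => PySem.Str.isIn x f) then
    "IT Asset Manager / CISO"
  else if ["cloud", "aws", "server", "infra", "rto", "trrp", "contingency"].any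
      (fun x => PySem.Str.isIn x f) then "CTO / DevOps Lead"
  else if ["coding", "sdl", "system-acquisition", "garbage"].any
      (fun x => PySem.Str.isIn x f) then "Engineering Lead"
  else if ["quality"].any (fun x => PySem.Str.isIn x f) then "QA Manager"
  else if ["marketing", "selling", "anti-trust", "modern-slavery", "ethical",
      "sar", "customer-data", "outsourc"].any (fun x => PySem.Str.isIn x f) then
    "Legal / Compliance Officer"
  else if ["siem", "log", "monitoring", "ir-playbook"].any
      (fun x => PySem.Str.isIn x f) then "Security Operations Manager"
  else "CISO / CTO"

-- ===== PORT B =====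
-- the flat keyword -> (priority, owner) dict literal KW of Source B (keys in the literal's order)
def pvItems : List (List Char × (Nat × String)) :=
  [("ciso".toList, (0, "CISO")),
   ("recruitment".toList, (1, "HR Manager")), ("onboarding".toList, (1, "HR Manager")),
   ("background".toList, (1, "HR Manager")), ("workapps-tech-recruit".toList, (1, "HR Manager")),
   ("asset".toList, (2, "IT Asset Manager / CISO")), ("inventory".toList, (2, "IT Asset Manager / CISO")),
   ("license".toList, (2, "IT Asset Manager / CISO")),
   ("cloud".toList, (3, "CTO / DevOps Lead")), ("aws".toList, (3, "CTO / DevOps Lead")),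
   ("server".toList, (3, "CTO / DevOps Lead")), ("infra".toList, (3, "CTO / DevOps Lead")),
   ("rto".toList, (3, "CTO / DevOps Lead")), ("trrp".toList, (3, "CTO / DevOps Lead")),
   ("contingency".toList, (3, "CTO / DevOps Lead")),
   ("coding".toList, (4, "Engineering Lead")), ("sdl".toList, (4, "Engineering Lead")),
   ("system-acquisition".toList, (4, "Engineering Lead")), ("garbage".toList, (4, "Engineering Lead")),
   ("quality".toList, (5, "QA Manager")),
   ("marketing".toList, (6, "Legal / Compliance Officer")), ("selling".toList, (6, "Legal / Compliance Officer")),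
   ("anti-trust".toList, (6, "Legal / Compliance Officer")), ("modern-slavery".toList, (6, "Legal / Compliance Officer")),
   ("ethical".toList, (6, "Legal / Compliance Officer")), ("sar".toList, (6, "Legal / Compliance Officer")),
   ("customer-data".toList, (6, "Legal / Compliance Officer")), ("outsourc".toList, (6, "Legal / Compliance Officer")),
   ("siem".toList, (7, "Security Operations Manager")), ("log".toList, (7, "Security Operations Manager")),
   ("monitoring".toList, (7, "Security Operations Manager")), ("ir-playbook".toList, (7, "Security Operations Manager"))]

def pvKW : PySem.Dict (List Char) (Nat × String) := PySem.Dict.mk pvItems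

-- LENS = sorted({len(k) for k in KW})
def pvLens : List Nat :=
  PySem.List.sorted (PySem.Set.ofList (pvKW.keys.map (·.length))) (fun x => x) false

-- the loop body: best = hit if hit is not None and (best is None or hit[0] < best[0]) else best
def pvStep (best : Option (Nat × String)) (hit : Option (Nat × String)) : Option (Nat × String) :=
  match hit, best with
  | some h, none => some h
  | some h, some b => if h.1 < b.1 then some h else some b
  | none, b => b

def infer_owner_alt (fn : String) : String :=
  let f := (PySem.Str.lower fn).toList
  let best := (PySem.List.pyRange 0 (f.length : Int) 1).foldl
    (fun best i =>
      pvLens.foldl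
        (fun best (L : Nat) =>
          pvStep best (pvKW.get? (PySem.List.slice f (some i) (some (i + (L : Int))))))
        best)
    none
  match best with
  | some b => b.2
  | none => "CISO / CTO"

-- ===== PRECONDITION & SPEC =====
def Spec_infer_owner (fn : String) (out : String) : Prop := out = infer_owner_alt fn
instance (fn : String) (out : String) : Decidable (Spec_infer_owner fn out) := by unfold Spec_infer_owner; infer_instance

-- ===== CLAIM (what is proved, stated in full; the proofs are below) =====
def Claim_equal_infer_owner : Prop := ∀ (fn : String), Dom_infer_owner fn → Spec_infer_owner fn (infer_owner fn)

-- ===== LEMMAS AND PROOFS =====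

-- all candidate hits of B's scan, as one flat list
def pvHits (f : List Char) : List (Nat × String) :=
  (List.range f.length).flatMap (fun i => pvLens.filterMap (fun L => pvKW.get? ((f.drop i).take L)))

-- group p has some keyword occurring in f
def pvMatched (f : List Char) (p : Nat) : Prop :=
  ∃ kv ∈ pvItems, kv.2.1 = p ∧ kv.1 <:+: f

def pvOwner : Nat → String
  | 0 => "CISO"
  | 1 => "HR Manager"
  | 2 => "IT Asset Manager / CISO"
  | 3 => "CTO / DevOps Lead"
  | 4 => "Engineering Lead"
  | 5 => "QA Manager"
  | 6 => "Legal / Compliance Officer"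
  | _ => "Security Operations Manager"

-- table facts (all by decide on the literal table)
lemma pv_table_facts : ∀ p ∈ pvItems,
    p.1 ≠ [] ∧ p.1.length ∈ pvLens ∧ pvKW.get? p.1 = some p.2 ∧ p.2.1 ≤ 7 ∧ p.2.2 = pvOwner p.2.1 := by
  decide

-- the inner Lens-fold is a fold of pvStep∘some over the filterMap of the lookups
lemma pv_inner_fold (g : Nat → Option (Nat × String)) (l : List Nat) (b : Option (Nat × String)) :
    l.foldl (fun best L => pvStep best (g L)) b
      = (l.filterMap g).foldl (fun best h => pvStep best (some h)) b := by
  induction l generalizing b with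
  | nil => rfl
  | cons hd tl ih =>
    cases hg : g hd with
    | none =>
      simp only [List.foldl_cons, List.filterMap_cons, hg]
      exact ih b
    | some v =>
      simp only [List.foldl_cons, List.filterMap_cons, hg]
      exact ih _

-- B's nested scan is the flat fold of pvStep over pvHits
lemma pv_alt_fold (f : List Char) :
    (PySem.List.pyRange 0 (f.length : Int) 1).foldl
      (fun best i =>
        pvLens.foldl
          (fun best (L : Nat) =>
            pvStep best (pvKW.get? (PySem.List.slice f (some i) (some (i + (L : Int))))))
          best)
      none
    = (pvHits f).foldl (fun b h => pvStep b (some h)) none := by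
  rw [PySem.List.pyRange_zero_nat, List.foldl_map]
  unfold pvHits
  rw [List.foldl_flatMap]
  refine List.foldl_ext _ _ none (fun b i _ => ?_)
  rw [← pv_inner_fold]
  refine List.foldl_ext _ _ b (fun b' L _ => ?_)
  rw [PySem.List.slice_natCast_add]

lemma pv_alt_eq (fn : String) :
    infer_owner_alt fn
      = (match (pvHits ((PySem.Str.lower fn).toList)).foldl (fun b h => pvStep b (some h)) none with
         | some v => v.2
         | none => "CISO / CTO") := by
  simp only [infer_owner_alt]
  rw [pv_alt_fold]

-- min-fold facts
lemma pv_fold_none_iff (l : List (Nat × String)) (b : Option (Nat × String)) :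
    l.foldl (fun b h => pvStep b (some h)) b = none ↔ b = none ∧ l = [] := by
  induction l generalizing b with
  | nil => simp
  | cons hd tl ih =>
    simp only [List.foldl_cons, ih]
    constructor
    · rintro ⟨h1, h2⟩
      cases b with
      | none => simp [pvStep] at h1
      | some v => simp [pvStep] at h1; split at h1 <;> simp_all
    · rintro ⟨h1, h2⟩; simp_all

lemma pv_fold_mem (l : List (Nat × String)) (b : Option (Nat × String)) (v : Nat × String)
    (h : l.foldl (fun b h => pvStep b (some h)) b = some v) : v ∈ l ∨ b = some v := by
  induction l generalizing b with
  | nil => simp_all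
  | cons hd tl ih =>
    simp only [List.foldl_cons] at h
    rcases ih _ h with hv | hv
    · exact Or.inl (List.mem_cons_of_mem _ hv)
    · cases b with
      | none => simp [pvStep] at hv; simp [hv]
      | some w =>
        simp only [pvStep] at hv
        split at hv
        · simp at hv; simp [hv]
        · exact Or.inr hv

lemma pvStep_some_eq (b : Option (Nat × String)) (h : Nat × String) :
    ∃ u, pvStep b (some h) = some u ∧ u.1 ≤ h.1 ∧ ∀ w, b = some w → u.1 ≤ w.1 := by
  cases b with
  | none => exact ⟨h, rfl, le_refl _, by simp⟩
  | some w =>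
    simp only [pvStep]
    split
    · exact ⟨h, rfl, le_refl _, fun w' hw' => by cases hw'; omega⟩
    · exact ⟨w, rfl, by omega, fun w' hw' => by cases hw'; rfl⟩

lemma pv_fold_le (l : List (Nat × String)) (b : Option (Nat × String)) (v : Nat × String)
    (h : l.foldl (fun b h => pvStep b (some h)) b = some v) :
    (∀ w ∈ l, v.1 ≤ w.1) ∧ (∀ u, b = some u → v.1 ≤ u.1) := by
  induction l generalizing b with
  | nil =>
    simp only [List.foldl_nil] at h
    exact ⟨by simp, fun u hu => by rw [h] at hu; cases hu; rfl⟩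
  | cons hd tl ih =>
    simp only [List.foldl_cons] at h
    obtain ⟨htl, hb'⟩ := ih _ h
    obtain ⟨u, hu, hux, hub⟩ := pvStep_some_eq b hd
    have hvu : v.1 ≤ u.1 := hb' u hu
    refine ⟨fun w hw => ?_, fun w hw => le_trans hvu (hub w hw)⟩
    rcases List.mem_cons.mp hw with rfl | hw2
    · exact le_trans hvu hux
    · exact htl w hw2

-- hit characterization
lemma pv_mem_hits_iff (f : List Char) (v : Nat × String) :
    v ∈ pvHits f ↔ ∃ k, (k, v) ∈ pvItems ∧ k <:+: f := by
  unfold pvHits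
  simp only [List.mem_flatMap, List.mem_filterMap, List.mem_range]
  constructor
  · rintro ⟨i, hi, L, hL, hget⟩
    have hmem : ((f.drop i).take L, v) ∈ pvKW.items :=
      PySem.Dict.mem_items_of_get?_eq_some _ hget
    exact ⟨(f.drop i).take L, hmem,
      ((List.take_prefix _ _).isInfix).trans (List.drop_suffix _ _).isInfix⟩
  · rintro ⟨k, hk, hinf⟩
    obtain ⟨hne, hlen, hget, -, -⟩ := pv_table_facts _ hk
    have : PySem.Chars.isIn k f = true := (PySem.Chars.isIn_iff_infix _ _).mpr hinf
    obtain ⟨j, hj⟩ := (PySem.Chars.exists_prefix_drop_iff_isIn k f).mpr this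
    have hjlt : j < f.length := by
      by_contra hge
      have : f.drop j = [] := List.drop_eq_nil_iff.mpr (by omega)
      rw [this] at hj
      exact hne (List.prefix_nil.mp hj)
    refine ⟨j, hjlt, k.length, hlen, ?_⟩
    rw [← List.prefix_iff_eq_take.mp hj]
    exact hget

-- any member of pvHits is a matched group's entry
lemma pv_hit_matched (f : List Char) (v : Nat × String) (hv : v ∈ pvHits f) :
    pvMatched f v.1 ∧ v.1 ≤ 7 ∧ v.2 = pvOwner v.1 := by
  obtain ⟨k, hk, hinf⟩ := (pv_mem_hits_iff f v).mp hv
  obtain ⟨-, -, -, hle, hown⟩ := pv_table_facts _ hk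
  exact ⟨⟨(k, v), hk, rfl, hinf⟩, hle, hown⟩

-- the key lemma: when g is the first matched group, the scan's minimum is (g, owner g)
lemma pv_fold_eq_of_first (f : List Char) (g : Nat)
    (hg : pvMatched f g) (hlt : ∀ p < g, ¬ pvMatched f p) :
    (pvHits f).foldl (fun b h => pvStep b (some h)) none = some (g, pvOwner g) := by
  obtain ⟨kv, hkv, hp, hinf⟩ := hg
  have hmem : kv.2 ∈ pvHits f := (pv_mem_hits_iff f kv.2).mpr ⟨kv.1, hkv, hinf⟩
  obtain ⟨-, -, -, -, hown⟩ := pv_table_facts _ hkv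
  rcases hres : (pvHits f).foldl (fun b h => pvStep b (some h)) none with _ | v
  · rw [pv_fold_none_iff] at hres
    rw [hres.2] at hmem
    cases hmem
  · have hv := pv_fold_mem _ _ _ hres
    simp only [reduceCtorEq, or_false] at hv
    obtain ⟨hM, -, hvo⟩ := pv_hit_matched f v hv
    have hle := (pv_fold_le _ _ _ hres).1 kv.2 hmem
    rw [hp] at hle
    have : ¬ v.1 < g := fun hl => hlt v.1 hl hM
    have hveq : v.1 = g := by omega
    have : v = (g, pvOwner g) := by
      cases v; simp_all
    rw [this]

lemma pv_fold_eq_none (f : List Char) (hlt : ∀ p ≤ 7, ¬ pvMatched f p) :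
    (pvHits f).foldl (fun b h => pvStep b (some h)) none = none := by
  rw [pv_fold_none_iff]
  refine ⟨rfl, List.eq_nil_iff_forall_not_mem.mpr (fun v hv => ?_)⟩
  obtain ⟨hM, hle, -⟩ := pv_hit_matched f v hv
  exact hlt v.1 hle hM

-- per-group bridges between A's boolean checks and pvMatched
lemma pvM0 (f : List Char) : PySem.Chars.isIn "ciso".toList f = true ↔ pvMatched f 0 := by
  simp [pvMatched, pvItems, PySem.Chars.isIn_iff_infix]
lemma pvM1 (f : List Char) :
    (["recruitment", "onboarding", "background", "workapps-tech-recruit"].any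
      (fun x => PySem.Chars.isIn x.toList f)) = true ↔ pvMatched f 1 := by
  simp [pvMatched, pvItems, PySem.Chars.isIn_iff_infix]
lemma pvM2 (f : List Char) :
    (["asset", "inventory", "license"].any (fun x => PySem.Chars.isIn x.toList f)) = true
      ↔ pvMatched f 2 := by
  simp [pvMatched, pvItems, PySem.Chars.isIn_iff_infix]
lemma pvM3 (f : List Char) :
    (["cloud", "aws", "server", "infra", "rto", "trrp", "contingency"].any
      (fun x => PySem.Chars.isIn x.toList f)) = true ↔ pvMatched f 3 := by
  simp [pvMatched, pvItems, PySem.Chars.isIn_iff_infix]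
lemma pvM4 (f : List Char) :
    (["coding", "sdl", "system-acquisition", "garbage"].any
      (fun x => PySem.Chars.isIn x.toList f)) = true ↔ pvMatched f 4 := by
  simp [pvMatched, pvItems, PySem.Chars.isIn_iff_infix]
lemma pvM5 (f : List Char) :
    (["quality"].any (fun x => PySem.Chars.isIn x.toList f)) = true ↔ pvMatched f 5 := by
  simp [pvMatched, pvItems, PySem.Chars.isIn_iff_infix]
lemma pvM6 (f : List Char) :
    (["marketing", "selling", "anti-trust", "modern-slavery", "ethical",
      "sar", "customer-data", "outsourc"].any (fun x => PySem.Chars.isIn x.toList f)) = true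
      ↔ pvMatched f 6 := by
  simp [pvMatched, pvItems, PySem.Chars.isIn_iff_infix]
lemma pvM7 (f : List Char) :
    (["siem", "log", "monitoring", "ir-playbook"].any
      (fun x => PySem.Chars.isIn x.toList f)) = true ↔ pvMatched f 7 := by
  simp [pvMatched, pvItems, PySem.Chars.isIn_iff_infix]

-- ===== VERDICT (by name: the statement is the Claim_ definition above) =====
theorem infer_owner_spec : Claim_equal_infer_owner := by
  intro fn _
  unfold Spec_infer_owner
  rw [pv_alt_eq]
  unfold infer_owner
  simp only [PySem.Str.isIn_eq]
  set f := (PySem.Str.lower fn).toList with hf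
  split_ifs with h0 h1 h2 h3 h4 h5 h6 h7
  · have hfold := pv_fold_eq_of_first f 0 ((pvM0 f).mp h0) (by omega)
    rw [hfold]
    rfl
  · have hfold := pv_fold_eq_of_first f 1 ((pvM1 f).mp h1) (by
      intro p hp
      interval_cases p
      · exact fun h => h0 ((pvM0 f).mpr h)
      )
    rw [hfold]
    rfl
  · have hfold := pv_fold_eq_of_first f 2 ((pvM2 f).mp h2) (by
      intro p hp
      interval_cases p
      · exact fun h => h0 ((pvM0 f).mpr h)
      · exact fun h => h1 ((pvM1 f).mpr h)
      )
    rw [hfold]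
    rfl
  · have hfold := pv_fold_eq_of_first f 3 ((pvM3 f).mp h3) (by
      intro p hp
      interval_cases p
      · exact fun h => h0 ((pvM0 f).mpr h)
      · exact fun h => h1 ((pvM1 f).mpr h)
      · exact fun h => h2 ((pvM2 f).mpr h)
      )
    rw [hfold]
    rfl
  · have hfold := pv_fold_eq_of_first f 4 ((pvM4 f).mp h4) (by
      intro p hp
      interval_cases p
      · exact fun h => h0 ((pvM0 f).mpr h)
      · exact fun h => h1 ((pvM1 f).mpr h)
      · exact fun h => h2 ((pvM2 f).mpr h)
      · exact fun h => h3 ((pvM3 f).mpr h)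
      )
    rw [hfold]
    rfl
  · have hfold := pv_fold_eq_of_first f 5 ((pvM5 f).mp h5) (by
      intro p hp
      interval_cases p
      · exact fun h => h0 ((pvM0 f).mpr h)
      · exact fun h => h1 ((pvM1 f).mpr h)
      · exact fun h => h2 ((pvM2 f).mpr h)
      · exact fun h => h3 ((pvM3 f).mpr h)
      · exact fun h => h4 ((pvM4 f).mpr h)
      )
    rw [hfold]
    rfl
  · have hfold := pv_fold_eq_of_first f 6 ((pvM6 f).mp h6) (by
      intro p hp
      interval_cases p
      · exact fun h => h0 ((pvM0 f).mpr h)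
      · exact fun h => h1 ((pvM1 f).mpr h)
      · exact fun h => h2 ((pvM2 f).mpr h)
      · exact fun h => h3 ((pvM3 f).mpr h)
      · exact fun h => h4 ((pvM4 f).mpr h)
      · exact fun h => h5 ((pvM5 f).mpr h)
      )
    rw [hfold]
    rfl
  · have hfold := pv_fold_eq_of_first f 7 ((pvM7 f).mp h7) (by
      intro p hp
      interval_cases p
      · exact fun h => h0 ((pvM0 f).mpr h)
      · exact fun h => h1 ((pvM1 f).mpr h)
      · exact fun h => h2 ((pvM2 f).mpr h)
      · exact fun h => h3 ((pvM3 f).mpr h)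
      · exact fun h => h4 ((pvM4 f).mpr h)
      · exact fun h => h5 ((pvM5 f).mpr h)
      · exact fun h => h6 ((pvM6 f).mpr h)
      )
    rw [hfold]
    rfl
  · have hfold := pv_fold_eq_none f (by
      intro p hp
      interval_cases p
      · exact fun h => h0 ((pvM0 f).mpr h)
      · exact fun h => h1 ((pvM1 f).mpr h)
      · exact fun h => h2 ((pvM2 f).mpr h)
      · exact fun h => h3 ((pvM3 f).mpr h)
      · exact fun h => h4 ((pvM4 f).mpr h)
      · exact fun h => h5 ((pvM5 f).mpr h)
      · exact fun h => h6 ((pvM6 f).mpr h)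
      · exact fun h => h7 ((pvM7 f).mpr h)
      )
    rw [hfold]
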